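-- pv_equiv track=rewrite | github.com/IHateChem/Algo_practice | 프로그래머스/lv2/86052. 빛의 경로 사이클/빛의 경로 사이클.py | solution
-- ===== SOURCE A (Python) =====
-- def solution(grid):
--     path = {"S": lambda d: d, "L": lambda d: (d+1)%4, "R": lambda d: (d-1)%4}
--     X=len(grid)
--     Y=len(grid[0])
--     visited = [[[0]*4 for _ in range(Y)] for i in range(X)]
--     dir = [(1,0),(0,1), (-1,0), (0,-1)]
--     def light(x, y, d, n):
--         visited[x][y][d] = 1
--         dx, dy = dir[d]
--         x=(x+dx) % X;y=(y+dy)%Y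
--         d=path[grid[x][y]](d)
--         if visited[x][y][d]:
--             return n
--         else: return light(x,y,d,n+1)
--     answer = []
--     for i in range(X):
--         for j in range(Y):
--             for d in range(4):
--                 if not visited[i][j][d]:
--                     dx,dy=dir[d]
--                     answer.append(light(i,j, d, 1))
--     return sorted(answer)
-- ===== SOURCE B (Python) =====
-- def solution(grid):
--     X, Y = len(grid), len(grid[0])
--     turn = {"S": 0, "L": 1, "R": 3}
--     dirs = [(1, 0), (0, 1), (-1, 0), (0, -1)]
--     seen = set()
--     answer = []
--     for i in range(X):
--         for j in range(Y):
--             for d0 in range(4):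
--                 if (i, j, d0) in seen:
--                     continue
--                 x, y, d, n = i, j, d0, 1
--                 while True:
--                     seen.add((x, y, d))
--                     dx, dy = dirs[d]
--                     x, y = (x + dx) % X, (y + dy) % Y
--                     d = (d + turn[grid[x][y]]) % 4
--                     if (x, y, d) in seen:
--                         break
--                     n += 1
--                 answer.append(n)
--     return sorted(answer)
-- ===== Notes on version B (the rewrite author's own statement) =====
-- stated objective: alternative
-- what changed: The recursive light() helper mutating a preallocated X*Y*4 bitmap becomes an explicit iterative walk, and the visited bookkeeping becomes a set of (x,y,d) tuples with an additive turn table instead of a dict of lambdas.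
import Mathlib
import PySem

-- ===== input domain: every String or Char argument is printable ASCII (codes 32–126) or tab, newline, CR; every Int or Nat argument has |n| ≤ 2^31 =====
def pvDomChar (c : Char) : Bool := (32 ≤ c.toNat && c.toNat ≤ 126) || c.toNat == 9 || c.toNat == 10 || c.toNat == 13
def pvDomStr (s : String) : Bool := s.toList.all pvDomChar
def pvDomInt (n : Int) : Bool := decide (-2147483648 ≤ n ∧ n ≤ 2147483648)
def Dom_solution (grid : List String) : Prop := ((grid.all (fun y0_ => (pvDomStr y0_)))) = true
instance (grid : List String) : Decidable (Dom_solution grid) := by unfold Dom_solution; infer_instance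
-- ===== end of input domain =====

-- B replaces A's recursive light() helper on a mutable X*Y*4 bitmap by an iterative walk
-- recording visited (x,y,d) states in a set, with an additive turn table instead of a dict of lambdas.

-- ===== PORT A =====
-- direction vectors, shared table of both Pythons
def pvDirs : List (Int × Int) := [(1, 0), (0, 1), (-1, 0), (0, -1)]

-- grid[x][y]; default only reached where the Python raises (outside Pre_)
def pvGridAt (grid : List String) (x y : Int) : Char :=
  (PySem.Str.pyGet? ((PySem.List.pyGet? grid x).getD "") y).getD 'S'

-- path[c](d); default branch only reached where Python raises KeyError (outside Pre_)
def pvPath (c : Char) (d : Int) : Int :=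
  if c = 'S' then d
  else if c = 'L' then PySem.Int.mod (d + 1) 4
  else if c = 'R' then PySem.Int.mod (d - 1) 4
  else d

-- visited[x][y][d] read / write on the 3D list
def pvVGet (v : List (List (List Int))) (x y d : Int) : Int :=
  ((PySem.List.pyGet? ((PySem.List.pyGet? ((PySem.List.pyGet? v x).getD []) y).getD []) d).getD 0)

def pvVSet (v : List (List (List Int))) (x y d : Int) : List (List (List Int)) :=
  let row := (PySem.List.pyGet? v x).getD []
  let cell := (PySem.List.pyGet? row y).getD []
  PySem.List.pySetD v x (PySem.List.pySetD row y (PySem.List.pySetD cell d 1))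

-- def light(x, y, d, n): … — the recursion terminates in Python (each call marks a fresh
-- state), fuel 4*X*Y+1 is a totality guard only
def pvLight (grid : List String) (X Y : Int) :
    Nat → List (List (List Int)) → Int → Int → Int → Int → Int × List (List (List Int))
  | 0, v, _, _, _, n => (n, v)
  | fuel + 1, v, x, y, d, n =>
    let v' := pvVSet v x y d
    let p := (PySem.List.pyGet? pvDirs d).getD (0, 0)
    let x' := PySem.Int.mod (x + p.1) X
    let y' := PySem.Int.mod (y + p.2) Y
    let d' := pvPath (pvGridAt grid x' y') d
    if pvVGet v' x' y' d' ≠ 0 then (n, v')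
    else pvLight grid X Y fuel v' x' y' d' (n + 1)

def solution (grid : List String) : List Int :=
  let X : Int := grid.length
  let Y : Int := PySem.Str.len ((PySem.List.pyGet? grid 0).getD "")
  let v0 : List (List (List Int)) :=
    List.replicate X.toNat (List.replicate Y.toNat (List.replicate 4 (0 : Int)))
  let res := (PySem.List.pyRange 0 X 1).foldl (fun st i =>
    (PySem.List.pyRange 0 Y 1).foldl (fun st j =>
      (PySem.List.pyRange 0 4 1).foldl (fun st d =>
        if pvVGet st.1 i j d = 0 then
          let r := pvLight grid X Y ((X * Y * 4).toNat + 1) st.1 i j d 1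
          (r.2, st.2 ++ [r.1])
        else st) st) st) (v0, ([] : List Int))
  PySem.List.sorted res.2 (fun z => z) false

-- ===== PORT B =====
-- turn[c]; getD 0 only reached where the Python raises KeyError (outside Pre_)
def pvTurn (c : Char) : Int :=
  if c = 'S' then 0 else if c = 'L' then 1 else if c = 'R' then 3 else 0

-- the `while True` walk of Source B; fuel 4*X*Y+1 is a totality guard only (each pass
-- adds a fresh state to `seen`)
def pvWalk (grid : List String) (X Y : Int) :
    Nat → PySem.Set (Int × Int × Int) → Int → Int → Int → Int → Int × PySem.Set (Int × Int × Int)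
  | 0, s, _, _, _, n => (n, s)
  | fuel + 1, s, x, y, d, n =>
    let s' := PySem.Set.add s (x, y, d)
    let p := (PySem.List.pyGet? pvDirs d).getD (0, 0)
    let x' := PySem.Int.mod (x + p.1) X
    let y' := PySem.Int.mod (y + p.2) Y
    let d' := PySem.Int.mod (d + pvTurn (pvGridAt grid x' y')) 4
    if PySem.Set.contains s' (x', y', d') then (n, s')
    else pvWalk grid X Y fuel s' x' y' d' (n + 1)

def solution_alt (grid : List String) : List Int :=
  let X : Int := grid.length
  let Y : Int := PySem.Str.len ((PySem.List.pyGet? grid 0).getD "")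
  let res := (PySem.List.pyRange 0 X 1).foldl (fun st i =>
    (PySem.List.pyRange 0 Y 1).foldl (fun st j =>
      (PySem.List.pyRange 0 4 1).foldl (fun st d0 =>
        if PySem.Set.contains st.1 (i, j, d0) then st
        else
          let r := pvWalk grid X Y ((X * Y * 4).toNat + 1) st.1 i j d0 1
          (r.2, st.2 ++ [r.1])) st) st)
    ((PySem.Set.empty : PySem.Set (Int × Int × Int)), ([] : List Int))
  PySem.List.sorted res.2 (fun z => z) false

-- ===== PRECONDITION & SPEC =====
-- Exactly where Python A returns: grid non-empty (else IndexError on grid[0]), every row at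
-- least Y = len(grid[0]) long (else IndexError on grid[x][y]), and every character in the
-- first Y columns one of S/L/R (else KeyError in path[...]).
def Pre_solution (grid : List String) : Prop :=
  grid ≠ [] ∧ ∀ s ∈ grid,
    (grid.headD "").toList.length ≤ s.toList.length ∧
    ∀ k < (grid.headD "").toList.length, s.toList.getD k 'S' ∈ ['S', 'L', 'R']
instance (grid : List String) : Decidable (Pre_solution grid) := by
  unfold Pre_solution; infer_instance

def pvWitness_solution : List String := ["SL", "LR"]

def Spec_solution (grid : List String) (out : List Int) : Prop := out = solution_alt grid
instance (grid : List String) (out : List Int) : Decidable (Spec_solution grid out) := by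
  unfold Spec_solution; infer_instance

-- ===== CLAIM (what is proved, stated in full; the proofs are below) =====
def Claim_equal_solution : Prop :=
  ∀ (grid : List String), Dom_solution grid → Pre_solution grid →
    Spec_solution grid (solution grid)

-- ===== LEMMAS AND PROOFS =====

-- the simulation relation: the 3D bitmap and the set mark the same in-range states,
-- and the bitmap keeps its X × Y × 4 shape
def pvRel (X Y : Int) (v : List (List (List Int))) (s : PySem.Set (Int × Int × Int)) : Prop :=
  v.length = X.toNat ∧
  (∀ row ∈ v, row.length = Y.toNat ∧ ∀ cell ∈ row, cell.length = 4) ∧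
  ∀ x y d : Int, 0 ≤ x → x < X → 0 ≤ y → y < Y → 0 ≤ d → d < 4 →
    pvVGet v x y d = if (x, y, d) ∈ s then 1 else 0

theorem pvVGet_eq (v : List (List (List Int))) {x y d : Int}
    (hx : 0 ≤ x) (hy : 0 ≤ y) (hd : 0 ≤ d) :
    pvVGet v x y d = (((((v[x.toNat]?).getD [])[y.toNat]?).getD [])[d.toNat]?).getD 0 := by
  unfold pvVGet
  rw [PySem.List.pyGet?_of_nonneg v hx, PySem.List.pyGet?_of_nonneg _ hy,
    PySem.List.pyGet?_of_nonneg _ hd]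

theorem pvVSet_eq (v : List (List (List Int))) {x y d : Int}
    (hx : 0 ≤ x) (hy : 0 ≤ y) (hd : 0 ≤ d)
    (hxl : x.toNat < v.length) (hyl : y.toNat < (v[x.toNat]).length) :
    pvVSet v x y d =
      v.set x.toNat ((v[x.toNat]).set y.toNat (((v[x.toNat])[y.toNat]).set d.toNat 1)) := by
  show PySem.List.pySetD v x
      (PySem.List.pySetD ((PySem.List.pyGet? v x).getD []) y
        (PySem.List.pySetD
          ((PySem.List.pyGet? ((PySem.List.pyGet? v x).getD []) y).getD []) d 1)) = _
  rw [PySem.List.pyGet?_of_nonneg v hx, List.getElem?_eq_getElem hxl, Option.getD_some,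
    PySem.List.pyGet?_of_nonneg _ hy, List.getElem?_eq_getElem hyl, Option.getD_some,
    PySem.List.pySetD_of_nonneg _ _ hd, PySem.List.pySetD_of_nonneg _ _ hy,
    PySem.List.pySetD_of_nonneg _ _ hx]

theorem pvRel_init (X Y : Int) :
    pvRel X Y (List.replicate X.toNat (List.replicate Y.toNat (List.replicate 4 (0 : Int))))
      PySem.Set.empty := by
  refine ⟨by simp, by simp, ?_⟩
  intro x y d hx hxX hy hyY hd hd4
  rw [pvVGet_eq _ hx hy hd]
  have hx' : x.toNat < X.toNat := by omega
  have hy' : y.toNat < Y.toNat := by omega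
  have hd' : d.toNat < 4 := by omega
  set k := d.toNat with hk
  simp only [List.getElem?_replicate, hx', hy', hd', if_pos, Option.getD_some,
    PySem.Set.empty]
  interval_cases k <;> rfl

theorem pvRel_set {X Y : Int} {v s} (h : pvRel X Y v s) {x y d : Int}
    (hx : 0 ≤ x) (hxX : x < X) (hy : 0 ≤ y) (hyY : y < Y) (hd : 0 ≤ d) (hd4 : d < 4) :
    pvRel X Y (pvVSet v x y d) (PySem.Set.add s (x, y, d)) := by
  obtain ⟨hlen, hshape, hmem⟩ := h
  have hxlt : x.toNat < v.length := by omega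
  have hrow : v[x.toNat] ∈ v := List.getElem_mem _
  obtain ⟨hrlen, hcells⟩ := hshape _ hrow
  have hylt : y.toNat < (v[x.toNat]).length := by omega
  have hcell : (v[x.toNat])[y.toNat] ∈ v[x.toNat] := List.getElem_mem _
  have hclen := hcells _ hcell
  rw [pvVSet_eq v hx hy hd hxlt hylt]
  refine ⟨by simp [hlen], ?_, ?_⟩
  · intro row hrowmem
    rcases List.mem_or_eq_of_mem_set hrowmem with h1 | h1
    · exact hshape _ h1
    · subst h1
      refine ⟨by simpa using hrlen, ?_⟩
      intro cell hcellmem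
      rcases List.mem_or_eq_of_mem_set hcellmem with h2 | h2
      · exact hcells _ h2
      · subst h2; simpa using hclen
  · intro a b c ha haX hb hbY hc hc4
    have hprev := hmem a b c ha haX hb hbY hc hc4
    rw [pvVGet_eq _ ha hb hc] at hprev ⊢
    by_cases hax : a.toNat = x.toNat
    · have hax' : x = a := by omega
      subst hax'
      rw [List.getElem?_set_self (by omega), Option.getD_some]
      rw [List.getElem?_eq_getElem hxlt, Option.getD_some] at hprev
      by_cases hby : b.toNat = y.toNat
      · have hby' : y = b := by omega
        subst hby'
        rw [List.getElem?_set_self (by omega), Option.getD_some]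
        rw [List.getElem?_eq_getElem hylt, Option.getD_some] at hprev
        by_cases hcd : c.toNat = d.toNat
        · have hcd' : d = c := by omega
          subst hcd'
          rw [List.getElem?_set_self (by omega), Option.getD_some]
          have hmm : ((x, y, d) ∈ PySem.Set.add s (x, y, d)) := by
            rw [PySem.Set.mem_add]; right; rfl
          rw [if_pos hmm]
        · rw [List.getElem?_set_ne (by omega), hprev]
          have hne : (x, y, c) ≠ (x, y, d) := by
            intro hEq
            have h1 : c = d := congrArg (fun t => t.2.2) hEq
            omega
          have hiff : ((x, y, c) ∈ PySem.Set.add s (x, y, d)) ↔ (x, y, c) ∈ s := by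
            rw [PySem.Set.mem_add]; exact or_iff_left hne
          by_cases hm : (x, y, c) ∈ s
          · rw [if_pos hm, if_pos (hiff.mpr hm)]
          · rw [if_neg hm, if_neg (fun hmm => hm (hiff.mp hmm))]
      · rw [List.getElem?_set_ne (by omega), hprev]
        have hne : (x, b, c) ≠ (x, y, d) := by
          intro hEq
          have h1 : b = y := congrArg (fun t => t.2.1) hEq
          omega
        have hiff : ((x, b, c) ∈ PySem.Set.add s (x, y, d)) ↔ (x, b, c) ∈ s := by
          rw [PySem.Set.mem_add]; exact or_iff_left hne
        by_cases hm : (x, b, c) ∈ s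
        · rw [if_pos hm, if_pos (hiff.mpr hm)]
        · rw [if_neg hm, if_neg (fun hmm => hm (hiff.mp hmm))]
    · rw [List.getElem?_set_ne (by omega), hprev]
      have hne : (a, b, c) ≠ (x, y, d) := by
        intro hEq
        have h1 : a = x := congrArg (fun t => t.1) hEq
        omega
      have hiff : ((a, b, c) ∈ PySem.Set.add s (x, y, d)) ↔ (a, b, c) ∈ s := by
        rw [PySem.Set.mem_add]; exact or_iff_left hne
      by_cases hm : (a, b, c) ∈ s
      · rw [if_pos hm, if_pos (hiff.mpr hm)]
      · rw [if_neg hm, if_neg (fun hmm => hm (hiff.mp hmm))]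

-- A's dict-of-lambdas step equals B's additive turn, for a direction in range
theorem pvPath_eq_turn (c : Char) (d : Int) (hd : 0 ≤ d) (hd4 : d < 4) :
    pvPath c d = PySem.Int.mod (d + pvTurn c) 4 := by
  unfold pvPath pvTurn
  have h4 : (0 : Int) < 4 := by norm_num
  split_ifs <;> (try rw [PySem.Int.mod_eq_emod_of_pos h4]) <;>
    (try rw [PySem.Int.mod_eq_emod_of_pos h4]) <;> omega

theorem pvPath_range (c : Char) (d : Int) (hd : 0 ≤ d) (hd4 : d < 4) :
    0 ≤ pvPath c d ∧ pvPath c d < 4 := by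
  unfold pvPath
  split_ifs
  · omega
  · exact ⟨PySem.Int.mod_nonneg _ (by norm_num), PySem.Int.mod_lt _ (by norm_num)⟩
  · exact ⟨PySem.Int.mod_nonneg _ (by norm_num), PySem.Int.mod_lt _ (by norm_num)⟩
  · omega

-- one chase: the recursive light() and the iterative walk return the same count and
-- leave related visited structures
theorem pvStep_eq (grid : List String) (X Y : Int) (hX : 0 < X) (hY : 0 < Y) :
    ∀ (fuel : Nat) (v : List (List (List Int))) (s : PySem.Set (Int × Int × Int))
      (x y d n : Int), pvRel X Y v s →
      0 ≤ x → x < X → 0 ≤ y → y < Y → 0 ≤ d → d < 4 →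
      (pvLight grid X Y fuel v x y d n).1 = (pvWalk grid X Y fuel s x y d n).1 ∧
      pvRel X Y (pvLight grid X Y fuel v x y d n).2 (pvWalk grid X Y fuel s x y d n).2 := by
  intro fuel
  induction fuel with
  | zero => intro v s x y d n h _ _ _ _ _ _; exact ⟨rfl, h⟩
  | succ fuel ih =>
    intro v s x y d n h hx hxX hy hyY hd hd4
    have hrel' := pvRel_set h hx hxX hy hyY hd hd4
    simp only [pvLight, pvWalk]
    set p := (PySem.List.pyGet? pvDirs d).getD (0, 0) with hp
    set x' := PySem.Int.mod (x + p.1) X with hx'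
    set y' := PySem.Int.mod (y + p.2) Y with hy'
    have hx'0 : 0 ≤ x' := PySem.Int.mod_nonneg _ hX
    have hx'X : x' < X := PySem.Int.mod_lt _ hX
    have hy'0 : 0 ≤ y' := PySem.Int.mod_nonneg _ hY
    have hy'Y : y' < Y := PySem.Int.mod_lt _ hY
    set c := pvGridAt grid x' y' with hc
    have hdeq : pvPath c d = PySem.Int.mod (d + pvTurn c) 4 := pvPath_eq_turn c d hd hd4
    have hdrange := pvPath_range c d hd hd4
    have hguard :
        (pvVGet (pvVSet v x y d) x' y' (pvPath c d) ≠ 0) ↔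
        ((x', y', pvPath c d) ∈ PySem.Set.add s (x, y, d)) := by
      rw [hrel'.2.2 x' y' (pvPath c d) hx'0 hx'X hy'0 hy'Y hdrange.1 hdrange.2]
      by_cases hm : (x', y', pvPath c d) ∈ PySem.Set.add s (x, y, d) <;> simp [hm]
    have hcont :
        PySem.Set.contains (PySem.Set.add s (x, y, d)) (x', y', PySem.Int.mod (d + pvTurn c) 4)
          = true ↔ (x', y', pvPath c d) ∈ PySem.Set.add s (x, y, d) := by
      rw [PySem.Set.contains_iff, hdeq]
    by_cases hmem : (x', y', pvPath c d) ∈ PySem.Set.add s (x, y, d)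
    · rw [if_pos (hguard.mpr hmem), if_pos (hcont.mpr hmem)]
      exact ⟨rfl, hrel'⟩
    · rw [if_neg (fun hcontra => hmem (hguard.mp hcontra)),
        if_neg (by rw [Bool.not_eq_true, ← Bool.not_eq_true]; exact fun hcontra => hmem (hcont.mp hcontra))]
      rw [← hdeq]
      exact ih _ _ x' y' (pvPath c d) (n + 1) hrel' hx'0 hx'X hy'0 hy'Y hdrange.1 hdrange.2

-- generic fold simulation: if the two loop bodies agree on the answer list and preserve
-- the relation for every index of the range, so do the folds
theorem pvFoldl_rel {V S : Type} (R : V → S → Prop)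
    (fA : V × List Int → Int → V × List Int) (fB : S × List Int → Int → S × List Int)
    (l : List Int)
    (h : ∀ v s ans i, i ∈ l → R v s →
      (fA (v, ans) i).2 = (fB (s, ans) i).2 ∧ R (fA (v, ans) i).1 (fB (s, ans) i).1) :
    ∀ v s ans, R v s →
      (l.foldl fA (v, ans)).2 = (l.foldl fB (s, ans)).2 ∧
      R (l.foldl fA (v, ans)).1 (l.foldl fB (s, ans)).1 := by
  induction l with
  | nil => intro v s ans hR; exact ⟨rfl, hR⟩
  | cons a l ihl =>
    intro v s ans hR
    have ha := h v s ans a (List.mem_cons_self) hR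
    simp only [List.foldl_cons]
    have hthis := ihl (fun v s ans i hi => h v s ans i (List.mem_cons_of_mem _ hi))
      (fA (v, ans) a).1 (fB (s, ans) a).1 (fB (s, ans) a).2 ha.2
    have hpairA : fA (v, ans) a = ((fA (v, ans) a).1, (fB (s, ans) a).2) := by
      rw [← ha.1]
    rw [hpairA]
    simpa using hthis

theorem pvMain (grid : List String) (X Y : Int) (fuel : Nat) :
    ((PySem.List.pyRange 0 X 1).foldl (fun st i =>
      (PySem.List.pyRange 0 Y 1).foldl (fun st j =>
        (PySem.List.pyRange 0 4 1).foldl (fun st d =>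
          if pvVGet st.1 i j d = 0 then
            let r := pvLight grid X Y fuel st.1 i j d 1
            (r.2, st.2 ++ [r.1])
          else st) st) st)
      (List.replicate X.toNat (List.replicate Y.toNat (List.replicate 4 (0 : Int))),
        ([] : List Int))).2 =
    ((PySem.List.pyRange 0 X 1).foldl (fun st i =>
      (PySem.List.pyRange 0 Y 1).foldl (fun st j =>
        (PySem.List.pyRange 0 4 1).foldl (fun st d0 =>
          if PySem.Set.contains st.1 (i, j, d0) then st
          else
            let r := pvWalk grid X Y fuel st.1 i j d0 1
            (r.2, st.2 ++ [r.1])) st) st)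
      ((PySem.Set.empty : PySem.Set (Int × Int × Int)), ([] : List Int))).2 := by
  refine (pvFoldl_rel (pvRel X Y) _ _ (PySem.List.pyRange 0 X 1) ?_ _ _ []
    (pvRel_init X Y)).1
  intro v s ans i hi hR
  have hiB := (PySem.List.mem_pyRange_one).1 hi
  refine pvFoldl_rel (pvRel X Y) _ _ (PySem.List.pyRange 0 Y 1) ?_ v s ans hR
  intro v s ans j hj hR
  have hjB := (PySem.List.mem_pyRange_one).1 hj
  refine pvFoldl_rel (pvRel X Y) _ _ (PySem.List.pyRange 0 4 1) ?_ v s ans hR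
  intro v s ans d hdm hR
  have hdB := (PySem.List.mem_pyRange_one).1 hdm
  have hX : 0 < X := by omega
  have hY : 0 < Y := by omega
  have hguard : (pvVGet v i j d = 0) ↔ ¬ ((i, j, d) ∈ s) := by
    rw [hR.2.2 i j d hiB.1 hiB.2 hjB.1 hjB.2 hdB.1 hdB.2]
    by_cases hm : (i, j, d) ∈ s <;> simp [hm]
  by_cases hm : (i, j, d) ∈ s
  · rw [if_neg (by rw [hguard]; simp [hm]), if_pos ((PySem.Set.contains_iff s _).2 hm)]
    exact ⟨rfl, hR⟩
  · rw [if_pos (hguard.2 hm),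
      if_neg (by
        rw [Bool.not_eq_true, ← Bool.not_eq_true]
        exact fun hc => hm ((PySem.Set.contains_iff s _).1 hc))]
    have hstep := pvStep_eq grid X Y hX hY fuel v s i j d 1 hR
      hiB.1 hiB.2 hjB.1 hjB.2 hdB.1 hdB.2
    dsimp only
    exact ⟨by rw [hstep.1], hstep.2⟩

theorem solution_eq_alt (grid : List String) : solution grid = solution_alt grid := by
  simp only [solution, solution_alt]
  congr 1
  exact pvMain grid _ _ _

-- ===== VERDICT (by name: the statement is the Claim_ definition above) =====
theorem solution_spec : Claim_equal_solution := by
  intro grid _ _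
  unfold Spec_solution
  exact solution_eq_alt grid
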